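-- pv_equiv track=rewrite | github.com/cutehammond772/problem-solving-archive | 백준/Gold/24430. 알고리즘 수업 － 행렬 경로 문제 7/알고리즘 수업 － 행렬 경로 문제 7.py | solve
-- ===== SOURCE A (Python) =====
-- def solve(N, matrix, elements):
--   # [value, elements]
--   dist = [[(0, 0) for _ in range(N + 1)] for _ in range(N + 1)]
--
--   for r in range(1, N + 1):
--     for c in range(1, N + 1):
--       up_value, up_elements = dist[r - 1][c]
--       left_value, left_elements = dist[r][c - 1]
--       cost, element = matrix[r][c], elements[r][c]
--
--       dist[r][c] = max(
--         (up_value + cost, up_elements + element),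
--         (left_value + cost, left_elements + element)
--       )
--
--   return dist[N][N]
-- ===== SOURCE B (Python) =====
-- def solve(N, matrix, elements):
--   # Top-down memoized recursion instead of a bottom-up table.
--   memo = {}
--
--   def best(r, c):
--     if r == 0 or c == 0:
--       return (0, 0)
--     cached = memo.get((r, c))
--     if cached is not None:
--       return cached
--     up = best(r - 1, c)
--     left = best(r, c - 1)
--     cost, element = matrix[r][c], elements[r][c]
--     v = max((up[0] + cost, up[1] + element),
--             (left[0] + cost, left[1] + element))
--     memo[(r, c)] = v
--     return v
--
--   return best(N, N)
-- ===== Notes on version B (the rewrite author's own statement) =====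
-- stated objective: alternative
-- what changed: Replaced the bottom-up (N+1)x(N+1) DP table filled by nested index loops with a top-down memoized recursion best(r,c) over a dict cache.
import Mathlib
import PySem

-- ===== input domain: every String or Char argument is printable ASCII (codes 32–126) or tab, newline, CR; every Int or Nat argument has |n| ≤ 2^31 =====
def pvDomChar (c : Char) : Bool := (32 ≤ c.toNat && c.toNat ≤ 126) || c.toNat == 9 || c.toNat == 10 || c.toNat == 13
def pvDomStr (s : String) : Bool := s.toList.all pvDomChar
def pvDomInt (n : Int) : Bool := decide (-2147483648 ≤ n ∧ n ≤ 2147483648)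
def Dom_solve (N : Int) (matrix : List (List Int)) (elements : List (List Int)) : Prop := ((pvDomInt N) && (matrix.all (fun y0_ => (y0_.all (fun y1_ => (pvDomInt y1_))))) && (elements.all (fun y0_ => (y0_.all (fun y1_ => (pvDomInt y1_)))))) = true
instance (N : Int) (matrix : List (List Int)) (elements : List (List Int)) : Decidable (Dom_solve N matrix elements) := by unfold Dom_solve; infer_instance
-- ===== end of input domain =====

-- B replaces A's bottom-up table DP with a top-down memoized recursion; same return value on Pre_.

-- Python's max((a,b),(c,d)) on 2-tuples of ints: lexicographic, first argument wins ties.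
def pyMax2 (a b : Int × Int) : Int × Int :=
  if a.1 < b.1 ∨ (a.1 = b.1 ∧ a.2 < b.2) then b else a

-- ===== PORT A =====
-- A's inner-loop body, verbatim. dist[r][c] = v: r, c come from range(1, N+1), hence nonnegative,
-- so List.set with .toNat is exact. Reads use pyGetD: Pre_solve keeps every index in range,
-- where pyGetD equals Python indexing.
def innerBodyA (matrix elements : List (List Int)) (dist : List (List (Int × Int))) (r c : Int) : List (List (Int × Int)) :=
  let u := PySem.List.pyGetD (PySem.List.pyGetD dist (r - 1) []) c ((0 : Int), (0 : Int))
  let l := PySem.List.pyGetD (PySem.List.pyGetD dist r []) (c - 1) ((0 : Int), (0 : Int))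
  let cost := PySem.List.pyGetD (PySem.List.pyGetD matrix r []) c 0
  let element := PySem.List.pyGetD (PySem.List.pyGetD elements r []) c 0
  let v := pyMax2 (u.1 + cost, u.2 + element) (l.1 + cost, l.2 + element)
  dist.set r.toNat ((PySem.List.pyGetD dist r []).set c.toNat v)

def solve (N : Int) (matrix : List (List Int)) (elements : List (List Int)) : Int × Int :=
  let dist0 : List (List (Int × Int)) :=
    (PySem.List.pyRange 0 (N + 1) 1).map (fun _ =>
      (PySem.List.pyRange 0 (N + 1) 1).map (fun _ => ((0 : Int), (0 : Int))))
  let dist := (PySem.List.pyRange 1 (N + 1) 1).foldl (fun dist r =>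
    (PySem.List.pyRange 1 (N + 1) 1).foldl (fun dist c =>
      innerBodyA matrix elements dist r c) dist) dist0
  PySem.List.pyGetD (PySem.List.pyGetD dist N []) N ((0 : Int), (0 : Int))

-- ===== PORT B =====
-- B's recursive helper, verbatim: the memo dict is threaded through as state
-- (Python mutates the closed-over dict; here it is passed in and returned).
-- Python's base test is 'r == 0 or c == 0'; the '≤' guard only totalizes the
-- Lean recursion — negative r, c are unreachable from solve_alt on Pre_solve.
-- Reads matrix[r][c]/elements[r][c] via pyGetD, exact while Pre_ keeps indices in range.
def bestB (matrix elements : List (List Int)) (memo : PySem.Dict (Int × Int) (Int × Int)) (r c : Int) :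
    (Int × Int) × PySem.Dict (Int × Int) (Int × Int) :=
  if r ≤ 0 ∨ c ≤ 0 then (((0 : Int), (0 : Int)), memo)
  else
    match memo.get? (r, c) with
    | some cached => (cached, memo)
    | none =>
      let pu := bestB matrix elements memo (r - 1) c
      let pl := bestB matrix elements pu.2 r (c - 1)
      let cost := PySem.List.pyGetD (PySem.List.pyGetD matrix r []) c 0
      let element := PySem.List.pyGetD (PySem.List.pyGetD elements r []) c 0
      let v := pyMax2 (pu.1.1 + cost, pu.1.2 + element) (pl.1.1 + cost, pl.1.2 + element)
      (v, pl.2.insert (r, c) v)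
  termination_by (r.toNat, c.toNat)
  decreasing_by
    · have : 0 < r ∧ 0 < c := by omega
      exact Prod.Lex.left _ _ (by omega)
    · have : 0 < r ∧ 0 < c := by omega
      exact Prod.Lex.right _ (by omega)

def solve_alt (N : Int) (matrix : List (List Int)) (elements : List (List Int)) : Int × Int :=
  (bestB matrix elements PySem.Dict.empty N N).1

-- ===== PRECONDITION & SPEC =====
-- Pre_solve = exactly the inputs where the Python A returns: N ≥ 0, and (unless N = 0, where A
-- touches neither argument) every accessed row 1..N of matrix/elements exists with entries at
-- columns 1..N (otherwise A raises IndexError).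
def Pre_solve (N : Int) (matrix : List (List Int)) (elements : List (List Int)) : Prop :=
  0 ≤ N ∧ (N = 0 ∨
    (N + 1 ≤ (matrix.length : Int) ∧ N + 1 ≤ (elements.length : Int) ∧
     (∀ row ∈ (matrix.drop 1).take N.toNat, N + 1 ≤ (row.length : Int)) ∧
     (∀ row ∈ (elements.drop 1).take N.toNat, N + 1 ≤ (row.length : Int))))
instance (N : Int) (matrix : List (List Int)) (elements : List (List Int)) : Decidable (Pre_solve N matrix elements) := by unfold Pre_solve; infer_instance

def pvWitness_solve : Int × List (List Int) × List (List Int) :=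
  (2, [[0, 0, 0], [0, 3, 1], [0, 2, 4]], [[0, 0, 0], [0, 1, 5], [0, 2, 1]])

def Spec_solve (N : Int) (matrix : List (List Int)) (elements : List (List Int)) (out : Int × Int) : Prop := out = solve_alt N matrix elements
instance (N : Int) (matrix : List (List Int)) (elements : List (List Int)) (out : Int × Int) : Decidable (Spec_solve N matrix elements out) := by unfold Spec_solve; infer_instance

-- ===== CLAIM (what is proved, stated in full; the proofs are below) =====
def Claim_equal_solve : Prop := ∀ (N : Int) (matrix : List (List Int)) (elements : List (List Int)), Dom_solve N matrix elements → Pre_solve N matrix elements → Spec_solve N matrix elements (solve N matrix elements)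

-- ===== LEMMAS AND PROOFS =====

-- the mathematical recurrence both programs compute
def cellM (matrix elements : List (List Int)) (r c : Nat) : Int × Int :=
  ((matrix.getD r []).getD c 0, (elements.getD r []).getD c 0)

def best (matrix elements : List (List Int)) : Nat → Nat → Int × Int
  | 0, _ => (0, 0)
  | _ + 1, 0 => (0, 0)
  | r + 1, c + 1 =>
    let p := cellM matrix elements (r + 1) (c + 1)
    let u := best matrix elements r (c + 1)
    let l := best matrix elements (r + 1) c
    pyMax2 (u.1 + p.1, u.2 + p.2) (l.1 + p.1, l.2 + p.2)
  termination_by r c => (r, c)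

theorem best_zero_left (m e : List (List Int)) (c : Nat) : best m e 0 c = (0, 0) := by
  cases c <;> simp [best]

theorem best_zero_right (m e : List (List Int)) (r : Nat) : best m e r 0 = (0, 0) := by
  cases r <;> simp [best]

-- ---------- B side ----------

-- every value stored in the memo is the true recurrence value of its key
def MemoOK (m e : List (List Int)) (memo : PySem.Dict (Int × Int) (Int × Int)) : Prop :=
  ∀ k v, memo.get? k = some v → v = best m e k.1.toNat k.2.toNat

theorem memoOK_empty (m e : List (List Int)) : MemoOK m e PySem.Dict.empty := by
  intro k v h
  simp [PySem.Dict.get?_empty] at h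

theorem best_step (m e : List (List Int)) (r c : Nat) :
    pyMax2 ((best m e r (c + 1)).1 + (m.getD (r + 1) []).getD (c + 1) 0,
            (best m e r (c + 1)).2 + (e.getD (r + 1) []).getD (c + 1) 0)
           ((best m e (r + 1) c).1 + (m.getD (r + 1) []).getD (c + 1) 0,
            (best m e (r + 1) c).2 + (e.getD (r + 1) []).getD (c + 1) 0)
      = best m e (r + 1) (c + 1) := by
  conv_rhs => rw [best]
  simp [cellM]

-- the recomputed cell value equals the recurrence (pure cast bookkeeping)
theorem valB_eq (m e : List (List Int)) (r c : Int) (hr : 1 ≤ r) (hc : 1 ≤ c) :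
    pyMax2
      ((best m e (r - 1).toNat c.toNat).1 + PySem.List.pyGetD (PySem.List.pyGetD m r []) c 0,
       (best m e (r - 1).toNat c.toNat).2 + PySem.List.pyGetD (PySem.List.pyGetD e r []) c 0)
      ((best m e r.toNat (c - 1).toNat).1 + PySem.List.pyGetD (PySem.List.pyGetD m r []) c 0,
       (best m e r.toNat (c - 1).toNat).2 + PySem.List.pyGetD (PySem.List.pyGetD e r []) c 0)
      = best m e r.toNat c.toNat := by
  obtain ⟨a, rfl⟩ : ∃ a : Nat, r = ((a : Nat) : Int) + 1 := ⟨(r - 1).toNat, by omega⟩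
  obtain ⟨b, rfl⟩ : ∃ b : Nat, c = ((b : Nat) : Int) + 1 := ⟨(c - 1).toNat, by omega⟩
  have h1 : ((a : Int) + 1 - 1).toNat = a := by omega
  have h2 : ((b : Int) + 1 - 1).toNat = b := by omega
  have h3 : ((a : Int) + 1).toNat = a + 1 := by omega
  have h4 : ((b : Int) + 1).toNat = b + 1 := by omega
  have h5 : ((a : Int) + 1) = (((a + 1 : Nat)) : Int) := by push_cast; ring
  have h6 : ((b : Int) + 1) = (((b + 1 : Nat)) : Int) := by push_cast; ring
  rw [h1, h2, h3, h4, h5, h6, PySem.List.pyGetD_natCast, PySem.List.pyGetD_natCast,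
      PySem.List.pyGetD_natCast, PySem.List.pyGetD_natCast]
  exact best_step m e a b

theorem bestB_ok (m e : List (List Int)) :
    ∀ (n : Nat) (memo : PySem.Dict (Int × Int) (Int × Int)) (r c : Int),
      MemoOK m e memo → r.toNat + c.toNat ≤ n →
      (bestB m e memo r c).1 = best m e r.toNat c.toNat ∧ MemoOK m e (bestB m e memo r c).2 := by
  intro n
  induction n with
  | zero =>
    intro memo r c hok hn
    have hr : r ≤ 0 ∨ c ≤ 0 := by omega
    rw [bestB, if_pos hr]
    constructor
    · rcases hr with h | h
      · rw [show r.toNat = 0 by omega, best_zero_left]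
      · rw [show c.toNat = 0 by omega, best_zero_right]
    · exact hok
  | succ n ih =>
    intro memo r c hok hn
    by_cases hr : r ≤ 0 ∨ c ≤ 0
    · rw [bestB, if_pos hr]
      refine ⟨?_, hok⟩
      rcases hr with h | h
      · rw [show r.toNat = 0 by omega, best_zero_left]
      · rw [show c.toNat = 0 by omega, best_zero_right]
    · have hr1 : 1 ≤ r := by omega
      have hc1 : 1 ≤ c := by omega
      rw [bestB, if_neg hr]
      cases hget : memo.get? (r, c) with
      | some cached =>
        simp only
        exact ⟨hok _ _ hget, hok⟩
      | none =>
        simp only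
        have hu := ih memo (r - 1) c hok (by omega)
        have hl := ih (bestB m e memo (r - 1) c).2 r (c - 1) hu.2 (by omega)
        have hval : pyMax2
            ((bestB m e memo (r - 1) c).1.1 + PySem.List.pyGetD (PySem.List.pyGetD m r []) c 0,
             (bestB m e memo (r - 1) c).1.2 + PySem.List.pyGetD (PySem.List.pyGetD e r []) c 0)
            ((bestB m e (bestB m e memo (r - 1) c).2 r (c - 1)).1.1 + PySem.List.pyGetD (PySem.List.pyGetD m r []) c 0,
             (bestB m e (bestB m e memo (r - 1) c).2 r (c - 1)).1.2 + PySem.List.pyGetD (PySem.List.pyGetD e r []) c 0)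
            = best m e r.toNat c.toNat := by
          rw [hu.1, hl.1]
          exact valB_eq m e r c hr1 hc1
        refine ⟨hval, ?_⟩
        intro k v hkv
        rw [PySem.Dict.get?_insert] at hkv
        split_ifs at hkv with hk
        · cases hkv
          rw [hk]
          exact hval.symm ▸ rfl
        · exact hl.2 _ _ hkv

theorem solve_alt_eq_best (m e : List (List Int)) (n : Nat) :
    solve_alt (n : Int) m e = best m e n n := by
  have h := (bestB_ok m e (n + n) PySem.Dict.empty (n : Int) (n : Int) (memoOK_empty m e)
      (by omega)).1
  simpa [solve_alt] using h

-- ---------- A side ----------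

def distSpec (m e : List (List Int)) (n r c : Nat) : List (List (Int × Int)) :=
  (List.range (n + 1)).map (fun i => (List.range (n + 1)).map (fun j =>
    if i < r ∨ (i = r ∧ j ≤ c) then best m e i j else ((0 : Int), (0 : Int))))

theorem distSpec_zero (m e : List (List Int)) (n c : Nat) :
    distSpec m e n 0 c = distSpec m e n 0 0 := by
  unfold distSpec
  apply List.ext_getElem (by simp)
  intro i h1 h2
  simp only [List.getElem_map, List.getElem_range]
  apply List.ext_getElem (by simp)
  intro j hj1 hj2
  simp only [List.getElem_map, List.getElem_range]
  split_ifs <;> simp_all [best_zero_left]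

theorem distSpec_stable (m e : List (List Int)) (n r : Nat) :
    distSpec m e n r n = distSpec m e n (r + 1) 0 := by
  unfold distSpec
  apply List.ext_getElem (by simp)
  intro i h1 h2
  simp only [List.getElem_map, List.getElem_range]
  apply List.ext_getElem (by simp)
  intro j hj1 hj2
  simp only [List.getElem_map, List.getElem_range]
  simp only [List.length_map, List.length_range] at h1 hj1
  split_ifs with ha hb
  · rfl
  · omega
  · have hi : i = r + 1 := by omega
    have hj : j = 0 := by omega
    rw [hi, hj, best_zero_right]
  · rfl

theorem stepA (m e : List (List Int)) (n r k : Nat) (hr : r + 1 ≤ n) (hk : k + 1 ≤ n) :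
    innerBodyA m e (distSpec m e n (r + 1) k) ((r : Int) + 1) ((k : Int) + 1)
      = distSpec m e n (r + 1) (k + 1) := by
  have hrc : ((r : Int) + 1) = (((r + 1 : Nat)) : Int) := by push_cast; ring
  have hkc : ((k : Int) + 1) = (((k + 1 : Nat)) : Int) := by push_cast; ring
  have hru2 : (((r + 1 : Nat)) : Int) - 1 = ((r : Nat) : Int) := by push_cast; ring
  have hku2 : (((k + 1 : Nat)) : Int) - 1 = ((k : Nat) : Int) := by push_cast; ring
  simp only [innerBodyA, hrc, hkc, hru2, hku2, PySem.List.pyGetD_natCast, Int.toNat_natCast]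
  unfold distSpec
  rw [PySem.List.getD_map_range _ (n + 1) r _ (by omega),
      PySem.List.getD_map_range _ (n + 1) (r + 1) _ (by omega),
      PySem.List.getD_map_range _ (n + 1) (k + 1) _ (by omega),
      PySem.List.getD_map_range _ (n + 1) k _ (by omega)]
  rw [if_pos (by omega : r < r + 1 ∨ (r = r + 1 ∧ k + 1 ≤ k)),
      if_pos (by omega : r + 1 < r + 1 ∨ (r + 1 = r + 1 ∧ k ≤ k)),
      best_step]
  apply List.ext_getElem (by simp)
  intro i h1 h2
  simp only [List.length_map, List.length_range] at h1 h2
  simp only [List.getElem_set, List.getElem_map, List.getElem_range]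
  by_cases hi : r + 1 = i
  · rw [if_pos hi]
    subst hi
    apply List.ext_getElem (by simp)
    intro j hj1 hj2
    simp only [List.length_map, List.length_range] at hj1 hj2
    simp only [List.getElem_set, List.getElem_map, List.getElem_range]
    by_cases hj : k + 1 = j
    · subst hj
      simp
    · rw [if_neg hj]
      simp only [lt_irrefl, true_and, false_or]
      split_ifs <;> first | rfl | omega
  · rw [if_neg hi]
    apply List.map_congr_left
    intro j _
    split_ifs <;> first | rfl | omega

theorem innerA (m e : List (List Int)) (n r : Nat) (hr : r + 1 ≤ n) :
    ∀ (c : Nat), c ≤ n →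
    (PySem.List.pyRange 1 ((c : Int) + 1) 1).foldl
        (fun dist cc => innerBodyA m e dist ((r : Int) + 1) cc) (distSpec m e n (r + 1) 0)
      = distSpec m e n (r + 1) c := by
  intro c
  induction c with
  | zero =>
    intro _
    rw [show ((0 : Nat) : Int) + 1 = 1 by norm_num, PySem.List.pyRange_one_eq_nil (by omega),
        List.foldl_nil]
  | succ c ih =>
    intro hc
    rw [show (((c + 1 : Nat)) : Int) + 1 = ((c : Int) + 1) + 1 by push_cast; ring,
        PySem.List.pyRange_one_succ_right (by omega), List.foldl_append, ih (by omega),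
        List.foldl_cons, List.foldl_nil]
    exact stepA m e n r c hr hc

theorem outerA (m e : List (List Int)) (n : Nat) :
    ∀ (r : Nat), r ≤ n →
    (PySem.List.pyRange 1 ((r : Int) + 1) 1).foldl (fun dist rr =>
        (PySem.List.pyRange 1 ((n : Int) + 1) 1).foldl
          (fun dist cc => innerBodyA m e dist rr cc) dist)
      (distSpec m e n 0 0)
      = distSpec m e n r n := by
  intro r
  induction r with
  | zero =>
    intro _
    rw [show ((0 : Nat) : Int) + 1 = 1 by norm_num,
        show PySem.List.pyRange 1 1 = ([] : List Int) from PySem.List.pyRange_one_eq_nil (by omega),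
        List.foldl_nil]
    exact (distSpec_zero m e n n).symm
  | succ r ih =>
    intro hr
    rw [show (((r + 1 : Nat)) : Int) + 1 = ((r : Int) + 1) + 1 by push_cast; ring,
        PySem.List.pyRange_one_succ_right (a := 1) (b := (r : Int) + 1) (by omega),
        List.foldl_append, ih (by omega), List.foldl_cons, List.foldl_nil]
    rw [distSpec_stable]
    exact innerA m e n r (by omega) n (Nat.le_refl n)

theorem solve_eq_best (m e : List (List Int)) (n : Nat) :
    solve (n : Int) m e = best m e n n := by
  simp only [solve]
  have hinit : (PySem.List.pyRange 0 ((n : Int) + 1) 1).map (fun _ =>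
      (PySem.List.pyRange 0 ((n : Int) + 1) 1).map (fun _ => ((0 : Int), (0 : Int))))
      = distSpec m e n 0 0 := by
    unfold distSpec
    apply List.ext_getElem (by simp [PySem.List.length_pyRange_one])
    intro i h1 h2
    simp only [List.getElem_map, List.getElem_range]
    apply List.ext_getElem (by simp [PySem.List.length_pyRange_one])
    intro j hj1 hj2
    simp only [List.getElem_map, List.getElem_range]
    split_ifs with h
    · rcases h with h | h
      · omega
      · rw [h.1, best_zero_left]
    · rfl
  rw [hinit, outerA m e n n (Nat.le_refl n)]
  unfold distSpec
  rw [PySem.List.pyGetD_natCast, PySem.List.pyGetD_natCast,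
      PySem.List.getD_map_range _ (n + 1) n _ (by omega),
      PySem.List.getD_map_range _ (n + 1) n _ (by omega)]
  rw [if_pos (by omega)]

-- ===== VERDICT (by name: the statement is the Claim_ definition above) =====
theorem solve_spec : Claim_equal_solve := by
  intro N matrix elements _ hpre
  obtain ⟨hN, _⟩ := hpre
  obtain ⟨n, rfl⟩ : ∃ n : Nat, N = (n : Int) := ⟨N.toNat, (Int.toNat_of_nonneg hN).symm⟩
  show Spec_solve _ _ _ _
  unfold Spec_solve
  rw [solve_eq_best, solve_alt_eq_best]
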